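-- pv_equiv track=rewrite | github.com/viennamccarthy/open-psalter | src/data/sources/create_psalter.py | swap_spaces
-- ===== SOURCE A (Python) =====
-- def swap_spaces(line):
--
--     if isinstance(line, list):
--         new_line = []
--         for section in line:
--             if "</span>" in section[-12:]:
--                 p = section.rfind(">", -12, -1)
--                 if " " in section[p:-1]:
--                     index = section.rfind(" ")
--                     new_section = section[:index] + "&nbsp;" + section[index + 1:]
--                     new_line.append(new_section)
--                 else:
--                     p = section.rfind("<s")
--                     new_section = section[:p]
--                     if new_section.endswith("&nbsp;"):
--                         new_section = new_section[:-7]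
--                         new_line.append(swap_spaces(new_section) + section[p-7:])
--                     else:
--                         new_line.append(swap_spaces(new_section) + section[p:])
--
--             elif " " in section[-12:-1]:
--                 if "&nb" in section and len(section) < 50:
--                     new_line.append(section)
--                 else:
--                     index = section.rfind(" ")
--                     new_section = section[:index] + "&nbsp;" + section[index + 1:]
--                     new_line.append(new_section)
--             else:
--                 new_line.append(section)
--         return new_line
--     else:
--         if "</span>" in line[-12:]:
--             p = line.rfind(">", -12, -1)
--             if " " in line[p:-1]:
--                 index = line.rfind(" ")
--                 new_line = line[:index] + "&nbsp;" + line[index + 1:]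
--                 return new_line
--             else:
--                 p = line.rfind("<s")
--                 new_line = line[:p]
--                 if new_line.endswith("&nbsp;"):
--                     new_line = new_line[:-7]
--                     return swap_spaces(new_line) + line[p-7:]
--                 else:
--                     return swap_spaces(new_line) + line[p:]
--         elif " " in line[-12:-1]:
--             if "&nb" in line and len(line) < 50:
--                 return line
--             else:
--                 index = line.rfind(" ")
--                 new_line = line[:index] + "&nbsp;" + line[index + 1:]
--                 return new_line
--         else:
--             return line
-- ===== SOURCE B (Python) =====
-- def _process(s):
--     tail = ""
--     while "</span>" in s[-12:]:
--         p = s.rfind(">", -12, -1)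
--         if " " in s[p:-1]:
--             break
--         p = s.rfind("<s")
--         prefix = s[:p]
--         if prefix.endswith("&nbsp;"):
--             prefix = prefix[:-7]
--             tail = s[p - 7:] + tail
--         else:
--             tail = s[p:] + tail
--         s = prefix
--     if "</span>" in s[-12:]:
--         index = s.rfind(" ")
--         return s[:index] + "&nbsp;" + s[index + 1:] + tail
--     if " " in s[-12:-1]:
--         if "&nb" in s and len(s) < 50:
--             return s + tail
--         index = s.rfind(" ")
--         return s[:index] + "&nbsp;" + s[index + 1:] + tail
--     return s + tail
--
--
-- def swap_spaces(line):
--     if isinstance(line, list):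
--         return [_process(section) for section in line]
--     return _process(line)
-- ===== Notes on version B (the rewrite author's own statement) =====
-- stated objective: simpler
-- what changed: A's duplicated list/scalar blocks and its self-recursion (peel a trailing </span> chunk, recurse on the prefix, re-append the suffix) are replaced by one scalar helper used for both cases, with the recursion turned into an explicit while loop that accumulates the peeled suffixes in a tail string and runs the terminal replacement branches exactly once.
import Mathlib
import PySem

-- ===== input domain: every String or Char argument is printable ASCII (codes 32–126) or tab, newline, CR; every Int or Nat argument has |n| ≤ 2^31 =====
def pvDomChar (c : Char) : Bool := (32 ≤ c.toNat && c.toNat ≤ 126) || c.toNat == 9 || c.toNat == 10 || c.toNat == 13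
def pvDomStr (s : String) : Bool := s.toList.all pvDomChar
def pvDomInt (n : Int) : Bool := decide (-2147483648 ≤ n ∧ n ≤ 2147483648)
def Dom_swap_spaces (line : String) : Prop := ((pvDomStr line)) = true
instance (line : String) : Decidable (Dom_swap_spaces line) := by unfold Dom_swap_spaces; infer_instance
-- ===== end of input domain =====

-- B replaces A's self-recursion (peel a trailing </span> suffix, recurse on the prefix,
-- re-append the suffix) by a single while loop with an accumulated tail string; objective: simpler decomposition.

-- ===== PORT A =====
-- A's recursion, step for step, on code points; fuel bounds the recursion depth
-- (each recursive call is on a strict prefix, so length+1 fuel is never exhausted).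
def swapA : Nat → List Char → List Char
  | 0, s => s
  | fuel+1, s =>
    if PySem.Chars.isIn "</span>".toList (PySem.List.slice s (some (-12)) none) then
      let p := PySem.Chars.rfindFrom s ">".toList (-12) (some (-1))
      if PySem.Chars.isIn " ".toList (PySem.List.slice s (some p) (some (-1))) then
        let index := PySem.Chars.rfind s " ".toList
        PySem.List.slice s none (some index) ++ "&nbsp;".toList ++
          PySem.List.slice s (some (index + 1)) none
      else
        let p2 := PySem.Chars.rfind s "<s".toList
        let newLine := PySem.List.slice s none (some p2)
        if PySem.Chars.endswith newLine "&nbsp;".toList then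
          swapA fuel (PySem.List.slice newLine none (some (-7))) ++
            PySem.List.slice s (some (p2 - 7)) none
        else
          swapA fuel newLine ++ PySem.List.slice s (some p2) none
    else if PySem.Chars.isIn " ".toList (PySem.List.slice s (some (-12)) (some (-1))) then
      if PySem.Chars.isIn "&nb".toList s && decide (s.length < 50) then s
      else
        let index := PySem.Chars.rfind s " ".toList
        PySem.List.slice s none (some index) ++ "&nbsp;".toList ++
          PySem.List.slice s (some (index + 1)) none
    else s

def swap_spaces (line : String) : String :=
  String.ofList (swapA (line.toList.length + 1) line.toList)

-- ===== PORT B =====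
-- Source B's terminal branches, run once after the peeling loop; `tail` is the accumulated suffix.
def swapTermB (s tail : List Char) : List Char :=
  if PySem.Chars.isIn "</span>".toList (PySem.List.slice s (some (-12)) none) then
    let index := PySem.Chars.rfind s " ".toList
    PySem.List.slice s none (some index) ++ "&nbsp;".toList ++
      PySem.List.slice s (some (index + 1)) none ++ tail
  else if PySem.Chars.isIn " ".toList (PySem.List.slice s (some (-12)) (some (-1))) then
    if PySem.Chars.isIn "&nb".toList s && decide (s.length < 50) then s ++ tail
    else
      let index := PySem.Chars.rfind s " ".toList
      PySem.List.slice s none (some index) ++ "&nbsp;".toList ++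
        PySem.List.slice s (some (index + 1)) none ++ tail
  else s ++ tail

-- Source B's while loop: peel span suffixes onto `tail`, then fall through to swapTermB.
def swapLoopB : Nat → List Char → List Char → List Char
  | 0, s, tail => s ++ tail
  | fuel+1, s, tail =>
    if PySem.Chars.isIn "</span>".toList (PySem.List.slice s (some (-12)) none) then
      let p := PySem.Chars.rfindFrom s ">".toList (-12) (some (-1))
      if PySem.Chars.isIn " ".toList (PySem.List.slice s (some p) (some (-1))) then
        swapTermB s tail
      else
        let p2 := PySem.Chars.rfind s "<s".toList
        let pre := PySem.List.slice s none (some p2)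
        if PySem.Chars.endswith pre "&nbsp;".toList then
          swapLoopB fuel (PySem.List.slice pre none (some (-7)))
            (PySem.List.slice s (some (p2 - 7)) none ++ tail)
        else
          swapLoopB fuel pre (PySem.List.slice s (some p2) none ++ tail)
    else swapTermB s tail

def swap_spaces_alt (line : String) : String :=
  String.ofList (swapLoopB (line.toList.length + 1) line.toList [])

-- ===== PRECONDITION & SPEC =====
def Spec_swap_spaces (line : String) (out : String) : Prop := out = swap_spaces_alt line
instance (line : String) (out : String) : Decidable (Spec_swap_spaces line out) := by unfold Spec_swap_spaces; infer_instance

-- ===== CLAIM (what is proved, stated in full; the proofs are below) =====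
def Claim_equal_swap_spaces : Prop := ∀ (line : String), Dom_swap_spaces line → Spec_swap_spaces line (swap_spaces line)

-- ===== LEMMAS AND PROOFS =====

-- Loop invariant: B's loop with accumulated tail computes A's recursion followed by the tail.
theorem swapLoopB_eq_swapA (fuel : Nat) :
    ∀ (s tail : List Char), swapLoopB fuel s tail = swapA fuel s ++ tail := by
  induction fuel with
  | zero => intro s tail; rfl
  | succ n ih =>
    intro s tail
    rw [swapLoopB, swapA]
    simp only [swapTermB]
    split_ifs <;> simp_all [List.append_assoc]

-- ===== VERDICT (by name: the statement is the Claim_ definition above) =====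
theorem swap_spaces_spec : Claim_equal_swap_spaces := by
  intro line _
  unfold Spec_swap_spaces swap_spaces_alt swap_spaces
  rw [swapLoopB_eq_swapA, List.append_nil]
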